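-- pv_equiv track=rewrite | github.com/pypi-data/pypi-mirror-404 | packages/typed-clap/typed_clap-0.11.1.tar.gz/typed_clap-0.11.1/clap/help.py | get_help_from_docstring
-- ===== SOURCE A (Python) =====
-- def get_help_from_docstring(docstring: str) -> tuple[str, str]:
--     paragraphs: list[str] = []
--     curr_paragraph: list[str] = []
--     for line in map(str.strip, docstring.splitlines()):
--         if line:
--             curr_paragraph.append(line)
--         else:
--             if curr_paragraph:
--                 paragraphs.append(" ".join(curr_paragraph))
--                 curr_paragraph.clear()
--     if curr_paragraph:
--         paragraphs.append(" ".join(curr_paragraph))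
--     if not paragraphs:
--         return "", ""
--     short_help = paragraphs[0]
--     if short_help[-1] == "." and (len(short_help) == 1 or short_help[-2] != "."):
--         short_help = short_help[:-1]
--     if len(paragraphs) == 1:
--         return short_help, short_help
--     return short_help, "\n\n".join(paragraphs)
-- ===== SOURCE B (Python) =====
-- def get_help_from_docstring(docstring: str) -> tuple[str, str]:
--     def paragraphs_of(lines: list[str]) -> list[str]:
--         # split at the first blank line and recurse on the remainder
--         if not lines:
--             return []
--         if "" not in lines:
--             return [" ".join(lines)]
--         i = lines.index("")
--         rest = paragraphs_of(lines[i + 1:])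
--         return ([" ".join(lines[:i])] if i else []) + rest
--
--     paragraphs = paragraphs_of([line.strip() for line in docstring.splitlines()])
--     if not paragraphs:
--         return "", ""
--     short_help = paragraphs[0]
--     if short_help[-1] == "." and (len(short_help) == 1 or short_help[-2] != "."):
--         short_help = short_help[:-1]
--     if len(paragraphs) == 1:
--         return short_help, short_help
--     return short_help, "\n\n".join(paragraphs)
-- ===== Notes on version B (the rewrite author's own statement) =====
-- stated objective: alternative
-- what changed: A's element-wise buffer-and-flush loop over lines is replaced by a divide-and-conquer recursion that locates the next blank line with list.index, slices the paragraph off in one piece, and recurses on the remainder; the trailing-period trimming and return logic are unchanged.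
import Mathlib
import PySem

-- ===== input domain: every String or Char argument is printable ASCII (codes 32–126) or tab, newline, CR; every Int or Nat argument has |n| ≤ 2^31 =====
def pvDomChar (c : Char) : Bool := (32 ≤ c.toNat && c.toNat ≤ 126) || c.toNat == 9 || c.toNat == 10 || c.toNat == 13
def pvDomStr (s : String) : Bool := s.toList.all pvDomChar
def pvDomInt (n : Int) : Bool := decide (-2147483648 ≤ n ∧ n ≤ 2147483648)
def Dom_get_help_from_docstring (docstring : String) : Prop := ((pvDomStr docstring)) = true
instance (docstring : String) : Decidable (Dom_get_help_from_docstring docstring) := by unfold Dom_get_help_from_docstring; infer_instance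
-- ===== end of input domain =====

-- B replaces A's element-wise buffer-and-flush loop by a divide-and-conquer recursion
-- that finds the next blank line with index and slices one paragraph off at a time;
-- objective: alternative decomposition, same results.


-- ===== PORT A =====
-- A-side helper: the body of A's for-loop (state = (paragraphs, curr_paragraph)).
def aStep (st : List String × List String) (line : String) : List String × List String :=
  if line ≠ "" then (st.1, st.2 ++ [line])
  else if st.2 ≠ [] then (st.1 ++ [PySem.Str.join " " st.2], []) else st

def get_help_from_docstring (docstring : String) : String × String :=
  let lines := (PySem.Str.splitlines docstring).map PySem.Str.strip
  let st := lines.foldl aStep ([], [])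
  let paragraphs := if st.2 ≠ [] then st.1 ++ [PySem.Str.join " " st.2] else st.1
  match paragraphs with
  | [] => ("", "")
  | p0 :: rest =>
    let short_help :=
      if PySem.Str.pyGet? p0 (-1) = some '.' ∧
          (PySem.Str.len p0 = 1 ∨ PySem.Str.pyGet? p0 (-2) ≠ some '.')
      then PySem.Str.slice p0 none (some (-1)) else p0
    if rest = [] then (short_help, short_help)
    else (short_help, PySem.Str.join "\n\n" (p0 :: rest))

-- ===== PORT B =====
-- B-side helper: paragraphs_of — split at the first blank line, recurse on the rest.
def parasOf (ls : List String) : List String :=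
  if h0 : ls = [] then []
  else
    match h : PySem.List.index? ls "" with
    | none => [PySem.Str.join " " ls]
    | some i =>
      let rest := parasOf (PySem.List.slice ls (some ((i : Int) + 1)) none)
      (if i ≠ 0 then [PySem.Str.join " " (PySem.List.slice ls none (some (i : Int)))] else [])
        ++ rest
termination_by ls.length
decreasing_by
  obtain ⟨hi, -, -⟩ := PySem.List.getElem_of_index?_eq_some h
  have : PySem.List.slice ls (some ((i : Int) + 1)) none = ls.drop (i + 1) := by
    rw [show ((i : Int) + 1) = ((i + 1 : Nat) : Int) by push_cast; ring,
      PySem.List.slice_from_natCast]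
  simp [this]
  omega

def get_help_from_docstring_alt (docstring : String) : String × String :=
  let paragraphs := parasOf ((PySem.Str.splitlines docstring).map PySem.Str.strip)
  match paragraphs with
  | [] => ("", "")
  | p0 :: rest =>
    let short_help :=
      if PySem.Str.pyGet? p0 (-1) = some '.' ∧
          (PySem.Str.len p0 = 1 ∨ PySem.Str.pyGet? p0 (-2) ≠ some '.')
      then PySem.Str.slice p0 none (some (-1)) else p0
    if rest = [] then (short_help, short_help)
    else (short_help, PySem.Str.join "\n\n" (p0 :: rest))

-- ===== PRECONDITION & SPEC =====
def Spec_get_help_from_docstring (docstring : String) (out : String × String) : Prop := out = get_help_from_docstring_alt docstring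
instance (docstring : String) (out : String × String) : Decidable (Spec_get_help_from_docstring docstring out) := by unfold Spec_get_help_from_docstring; infer_instance

-- ===== CLAIM =====
def Claim_equal_get_help_from_docstring : Prop := ∀ (docstring : String), Dom_get_help_from_docstring docstring → Spec_get_help_from_docstring docstring (get_help_from_docstring docstring)

-- ===== LEMMAS AND PROOFS =====

-- A's flush of the loop state into the final paragraph list.
def flushP (st : List String × List String) : List String :=
  if st.2 ≠ [] then st.1 ++ [PySem.Str.join " " st.2] else st.1

lemma parasOf_nil : parasOf [] = [] := by
  rw [parasOf]; simp

lemma parasOf_empty_cons (ls : List String) : parasOf ("" :: ls) = parasOf ls := by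
  rw [parasOf, dif_neg (by simp : ¬("" :: ls = []))]
  split
  · next heq =>
      rw [PySem.List.index?_cons_self _ _] at heq; exact absurd heq (by simp)
  · next i heq =>
      rw [PySem.List.index?_cons_self _ _] at heq
      obtain rfl : (0 : Nat) = i := Option.some.inj heq
      have hdr : parasOf (PySem.List.slice ("" :: ls) (some (((0 : Nat) : Int) + 1)) none)
          = parasOf ls := by
        rw [show (((0 : Nat) : Int) + 1) = ((1 : Nat) : Int) by norm_num,
          PySem.List.slice_from_natCast]
        simp
      simpa using hdr

lemma parasOf_prefix (xs ys : List String) (hne : xs ≠ [])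
    (hall : ∀ x ∈ xs, x ≠ "")
    (hy : ys = [] ∨ ∃ t, ys = "" :: t) :
    parasOf (xs ++ ys) = PySem.Str.join " " xs :: parasOf ys := by
  have hnotmem : "" ∉ xs := fun hm => hall "" hm rfl
  rcases hy with hy | ⟨t, hy⟩
  · subst hy
    have h : PySem.List.index? (xs ++ ([] : List String)) "" = none := by
      rw [PySem.List.index?_eq_none_iff]; simpa using hnotmem
    rw [parasOf, dif_neg (by simp [hne] : ¬(xs ++ ([] : List String) = []))]
    split
    · simp [parasOf_nil]
    · next i heq => rw [h] at heq; exact absurd heq (by simp)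
  · subst hy
    have h : PySem.List.index? (xs ++ "" :: t) "" = some xs.length := by
      rw [PySem.List.index?_eq_some_iff]; exact ⟨xs, t, rfl, rfl, hnotmem⟩
    rw [parasOf, dif_neg (by simp [hne] : ¬(xs ++ "" :: t = []))]
    split
    · next heq => rw [h] at heq; exact absurd heq (by simp)
    · next i heq =>
        rw [h] at heq
        obtain rfl : xs.length = i := Option.some.inj heq
        have hdrop : PySem.List.slice (xs ++ "" :: t)
            (some (((xs.length : Nat) : Int) + 1)) none = t := by
          rw [show (((xs.length : Nat) : Int) + 1) = ((xs.length + 1 : Nat) : Int)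
              by push_cast; ring, PySem.List.slice_from_natCast]
          simp
        have htake : PySem.List.slice (xs ++ "" :: t) none
            (some ((xs.length : Nat) : Int)) = xs := by
          rw [PySem.List.slice_to_natCast]; simp
        have hlen : xs.length ≠ 0 := by simpa using hne
        simp [hdrop, htake, hlen, parasOf_empty_cons t]

lemma foldl_aStep_parasOf (ls : List String) :
    ∀ (paras curr : List String), (∀ x ∈ curr, x ≠ "") →
    flushP (ls.foldl aStep (paras, curr)) = paras ++ parasOf (curr ++ ls) := by
  induction ls with
  | nil =>
    intro paras curr hall
    by_cases hc : curr = []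
    · simp [hc, flushP, parasOf_nil]
    · have h2 : parasOf curr = [PySem.Str.join " " curr] := by
        simpa [parasOf_nil] using parasOf_prefix curr [] hc hall (Or.inl rfl)
      simp [flushP, hc, h2]
  | cons l ls ih =>
    intro paras curr hall
    rw [List.foldl_cons]
    by_cases hl : l ≠ ""
    · have hstep : aStep (paras, curr) l = (paras, curr ++ [l]) := by simp [aStep, hl]
      rw [hstep, ih paras (curr ++ [l]) (by
        intro x hx
        rcases List.mem_append.1 hx with h | h
        · exact hall x h
        · simp at h; simp [h, hl])]
      simp
    · simp only [ne_eq, not_not] at hl; subst hl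
      by_cases hc : curr = []
      · have hstep : aStep (paras, curr) "" = (paras, []) := by simp [aStep, hc]
        rw [hstep, ih paras [] (by simp), hc]
        simp [parasOf_empty_cons]
      · have hstep : aStep (paras, curr) "" = (paras ++ [PySem.Str.join " " curr], []) := by
          simp [aStep, hc]
        rw [hstep, ih (paras ++ [PySem.Str.join " " curr]) [] (by simp)]
        rw [show curr ++ "" :: ls = curr ++ ("" :: ls) by simp,
          parasOf_prefix curr ("" :: ls) hc hall (Or.inr ⟨ls, rfl⟩),
          parasOf_empty_cons]
        simp

lemma paras_eq (ls : List String) :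
    (if (ls.foldl aStep ([], [])).2 ≠ []
     then (ls.foldl aStep ([], [])).1 ++ [PySem.Str.join " " (ls.foldl aStep ([], [])).2]
     else (ls.foldl aStep ([], [])).1)
      = parasOf ls := by
  have h := foldl_aStep_parasOf ls [] [] (by simp)
  simpa [flushP] using h

-- ===== VERDICT =====
theorem get_help_from_docstring_spec : Claim_equal_get_help_from_docstring := by
  intro docstring _
  unfold Spec_get_help_from_docstring
  simp only [get_help_from_docstring, get_help_from_docstring_alt, paras_eq]
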